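-- pv_equiv track=rewrite | github.com/pokaladeviramya2713/Python | 9.py | max_guests_at_instance
-- ===== SOURCE A (Python) =====
-- def max_guests_at_instance(T, entering, leaving):
--     guests = 0
--     max_guests = 0
--     timeline = sorted(set(entering + leaving))
--
--     for time in timeline:
--         guests += entering.count(time)
--         guests -= leaving.count(time)
--         max_guests = max(max_guests, guests)
--
--     return max_guests
-- ===== SOURCE B (Python) =====
-- def max_guests_at_instance(T, entering, leaving):
--     # Direct maximization: the occupancy at time t is (#entering <= t) - (#leaving <= t);
--     # the answer is the max of that over every listed time, floored at 0.
--     return max([0] + [sum(e <= t for e in entering) - sum(l <= t for l in leaving)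
--                       for t in entering + leaving])
-- ===== Notes on version B (the rewrite author's own statement) =====
-- stated objective: alternative
-- what changed: B drops A's sorted-distinct-timeline sweep with a running guest counter entirely: it evaluates the occupancy function (#entering<=t) - (#leaving<=t) independently at each listed time and takes the maximum (floored at 0), with no sorting, no dedup and no accumulated state.
import Mathlib
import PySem

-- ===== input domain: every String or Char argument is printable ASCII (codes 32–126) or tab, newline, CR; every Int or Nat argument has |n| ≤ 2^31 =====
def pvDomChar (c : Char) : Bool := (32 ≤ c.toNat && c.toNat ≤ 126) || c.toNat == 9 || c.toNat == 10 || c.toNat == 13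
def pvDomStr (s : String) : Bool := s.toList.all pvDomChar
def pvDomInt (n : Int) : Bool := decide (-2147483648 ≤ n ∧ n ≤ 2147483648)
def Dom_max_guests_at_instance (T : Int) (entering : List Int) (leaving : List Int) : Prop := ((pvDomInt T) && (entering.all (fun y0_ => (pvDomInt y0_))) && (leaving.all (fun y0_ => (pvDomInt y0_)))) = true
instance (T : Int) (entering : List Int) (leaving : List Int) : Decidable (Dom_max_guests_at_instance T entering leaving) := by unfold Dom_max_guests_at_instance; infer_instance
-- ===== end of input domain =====

-- B replaces A's sorted-distinct-timeline sweep by an independent evaluation of the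
-- occupancy function at each listed time, maximized (objective: alternative; not faster).


-- ===== PORT A =====
-- Port of A: sorted(set(entering+leaving)); per time, guests += entering.count(t); guests -= leaving.count(t); track max.
def max_guests_at_instance (T : Int) (entering : List Int) (leaving : List Int) : Int :=
  let timeline := PySem.List.sorted (PySem.Set.ofList (entering ++ leaving)) (fun x => x) false
  (timeline.foldl (fun (s : Int × Int) time =>
      let guests := s.1 + (entering.count time : Int)
      let guests := guests - (leaving.count time : Int)
      (guests, max s.2 guests)) (0, 0)).2

-- ===== PORT B =====
-- Port of B: max([0] + [sum(e <= t for e in entering) - sum(l <= t for l in leaving) for t in entering+leaving]).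
-- max? on a list starting with 0 is never none; .getD 0 only totalizes.
def max_guests_at_instance_alt (T : Int) (entering : List Int) (leaving : List Int) : Int :=
  let vals := (entering ++ leaving).map (fun t =>
      (entering.map (fun e => if e ≤ t then (1 : Int) else 0)).sum
      - (leaving.map (fun l => if l ≤ t then (1 : Int) else 0)).sum)
  (PySem.List.max? ((0 : Int) :: vals) (fun y => y)).getD 0

-- ===== PRECONDITION & SPEC =====
def Spec_max_guests_at_instance (T : Int) (entering : List Int) (leaving : List Int) (out : Int) : Prop := out = max_guests_at_instance_alt T entering leaving
instance (T : Int) (entering : List Int) (leaving : List Int) (out : Int) : Decidable (Spec_max_guests_at_instance T entering leaving out) := by unfold Spec_max_guests_at_instance; infer_instance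

-- ===== CLAIM =====
def Claim_equal_max_guests_at_instance : Prop := ∀ (T : Int) (entering : List Int) (leaving : List Int), Dom_max_guests_at_instance T entering leaving → Spec_max_guests_at_instance T entering leaving (max_guests_at_instance T entering leaving)

-- ===== LEMMAS AND PROOFS =====

-- occupancy at time t
def pvOcc (e l : List Int) (t : Int) : Int :=
  (e.countP (fun x => decide (x ≤ t)) : Int) - (l.countP (fun x => decide (x ≤ t)) : Int)

-- the list of running guest counts A produces along ts, starting from g
def pvSweep (e l : List Int) (g : Int) : List Int → List Int
  | [] => []
  | t :: ts =>
      let g' := g + (e.count t : Int) - (l.count t : Int)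
      g' :: pvSweep e l g' ts

-- sum of 0/1 indicators = countP
theorem pv_sum_indicator (xs : List Int) (t : Int) :
    (xs.map (fun e => if e ≤ t then (1 : Int) else 0)).sum = (xs.countP (fun x => decide (x ≤ t)) : Int) := by
  induction xs with
  | nil => simp
  | cons x xs ih =>
    by_cases h : x ≤ t <;> simp [h, ih]; ring

-- countP pointwise split
theorem pv_countP_add (xs : List Int) (p q r : Int → Bool)
    (h : ∀ x ∈ xs, (if p x then (1 : Nat) else 0) = (if q x then 1 else 0) + (if r x then 1 else 0)) :
    xs.countP p = xs.countP q + xs.countP r := by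
  induction xs with
  | nil => simp
  | cons x xs ih =>
    have hx := h x (by simp)
    have ht := ih (fun y hy => h y (by simp [hy]))
    simp only [List.countP_cons]
    by_cases hp : p x <;> by_cases hq : q x <;> by_cases hr : r x <;>
      simp [hp, hq, hr] at hx ⊢ <;> omega

theorem pv_countP_congr (xs : List Int) (p q : Int → Bool) (h : ∀ x ∈ xs, p x = q x) :
    xs.countP p = xs.countP q := by
  induction xs with
  | nil => simp
  | cons x xs ih =>
    simp only [List.countP_cons, h x (by simp), ih (fun y hy => h y (by simp [hy]))]

-- the sweep values are exactly the occupancy at each time, on a strictly sorted complete timeline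
theorem pv_sweep_eq (e l : List Int) :
    ∀ (ts : List Int) (g : Int),
      ts.Pairwise (· < ·) →
      (∀ x, (x ∈ e ∨ x ∈ l) → x ∉ ts → ∀ y ∈ ts, x < y) →
      g = (e.countP (fun x => decide (x ∉ ts)) : Int) - (l.countP (fun x => decide (x ∉ ts)) : Int) →
      pvSweep e l g ts = ts.map (pvOcc e l) := by
  intro ts
  induction ts with
  | nil => intro g _ _ _; simp [pvSweep]
  | cons t ts ih =>
    intro g hs hout hg
    have hts : ∀ y ∈ ts, t < y := fun y hy => (List.pairwise_cons.mp hs).1 y hy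
    have hcount : ∀ (xs : List Int), (∀ x, x ∈ xs → (x ∈ e ∨ x ∈ l)) →
        xs.countP (fun x => decide (x ≤ t)) =
          xs.countP (fun x => decide (x ∉ t :: ts)) + xs.count t := by
      intro xs hxs
      rw [List.count_eq_countP]
      apply pv_countP_add
      intro x hx
      by_cases hm : x ∈ t :: ts
      · rcases List.mem_cons.mp hm with h1 | h2
        · subst h1; simp [hm]
        · have : t < x := hts x h2
          have hne : ¬ (x = t) := by omega
          have : ¬ (x ≤ t) := by omega
          simp [hm, hne, this]
      · have hlt : x < t := hout x (hxs x hx) hm t (by simp)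
        have : x ≤ t := le_of_lt hlt
        have hne : ¬ (x = t) := by omega
        simp [hm, hne, this]
    have hocc : g + (e.count t : Int) - (l.count t : Int) = pvOcc e l t := by
      rw [hg, pvOcc,
        hcount e (fun x hx => Or.inl hx), hcount l (fun x hx => Or.inr hx)]
      push_cast; ring
    have hnotin : ∀ (xs : List Int), (∀ x, x ∈ xs → (x ∈ e ∨ x ∈ l)) →
        xs.countP (fun x => decide (x ≤ t)) = xs.countP (fun x => decide (x ∉ ts)) := by
      intro xs hxs
      apply pv_countP_congr
      intro x hx
      by_cases hm : x ∈ ts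
      · have : t < x := hts x hm
        have : ¬ (x ≤ t) := by omega
        simp [hm, this]
      · by_cases hm2 : x ∈ t :: ts
        · rcases List.mem_cons.mp hm2 with h1 | h2
          · subst h1; simp [hm]
          · exact absurd h2 hm
        · have hlt : x < t := hout x (hxs x hx) hm2 t (by simp)
          have : x ≤ t := le_of_lt hlt
          simp [hm, this]
    have hrec : pvSweep e l (pvOcc e l t) ts = ts.map (pvOcc e l) := by
      apply ih
      · exact (List.pairwise_cons.mp hs).2
      · intro x hxel hxts y hy
        by_cases hm2 : x ∈ t :: ts
        · rcases List.mem_cons.mp hm2 with h1 | h2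
          · subst h1; exact hts y hy
          · exact absurd h2 hxts
        · have hlt : x < t := hout x hxel hm2 t (by simp)
          exact lt_trans hlt (hts y hy)
      · rw [pvOcc, hnotin e (fun x hx => Or.inl hx), hnotin l (fun x hx => Or.inr hx)]
    simp only [pvSweep, List.map_cons]
    rw [hocc, hrec]

-- A's fold computes the running max over the sweep values
theorem pv_fold_max (e l : List Int) :
    ∀ (ts : List Int) (g m : Int),
      (ts.foldl (fun (s : Int × Int) time =>
          let guests := s.1 + (e.count time : Int)
          let guests := guests - (l.count time : Int)
          (guests, max s.2 guests)) (g, m)).2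
        = (pvSweep e l g ts).foldl max m := by
  intro ts
  induction ts with
  | nil => intro g m; simp [pvSweep]
  | cons t ts ih => intro g m; simp only [List.foldl_cons, pvSweep]; rw [ih]

-- foldl max facts
theorem pv_le_foldl_max (xs : List Int) : ∀ (a : Int), a ≤ xs.foldl max a := by
  induction xs with
  | nil => intro a; simp
  | cons x xs ih => intro a; exact le_trans (le_max_left a x) (ih (max a x))

theorem pv_mem_le_foldl_max (xs : List Int) : ∀ (a x : Int), x ∈ xs → x ≤ xs.foldl max a := by
  induction xs with
  | nil => intro a x hx; simp at hx
  | cons y xs ih =>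
    intro a x hx
    rcases List.mem_cons.mp hx with h1 | h2
    · subst h1; exact le_trans (le_max_right a x) (pv_le_foldl_max xs (max a x))
    · exact ih (max a y) x h2

theorem pv_foldl_max_le (xs : List Int) : ∀ (a c : Int), a ≤ c → (∀ x ∈ xs, x ≤ c) →
    xs.foldl max a ≤ c := by
  induction xs with
  | nil => intro a c ha _; simpa using ha
  | cons y xs ih =>
    intro a c ha h
    exact ih (max a y) c (max_le ha (h y (by simp))) (fun x hx => h x (by simp [hx]))

-- foldl max 0 over mapped occupancies depends only on membership
theorem pv_foldl_max_mem_eq (f : Int → Int) (L1 L2 : List Int)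
    (h : ∀ x, x ∈ L1 ↔ x ∈ L2) :
    (L1.map f).foldl max 0 = (L2.map f).foldl max 0 := by
  apply le_antisymm
  · apply pv_foldl_max_le
    · exact pv_le_foldl_max _ 0
    · intro x hx
      rcases List.mem_map.mp hx with ⟨y, hy, rfl⟩
      exact pv_mem_le_foldl_max _ 0 _ (List.mem_map.mpr ⟨y, (h y).mp hy, rfl⟩)
  · apply pv_foldl_max_le
    · exact pv_le_foldl_max _ 0
    · intro x hx
      rcases List.mem_map.mp hx with ⟨y, hy, rfl⟩
      exact pv_mem_le_foldl_max _ 0 _ (List.mem_map.mpr ⟨y, (h y).mpr hy, rfl⟩)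

-- ===== VERDICT =====
theorem max_guests_at_instance_spec : Claim_equal_max_guests_at_instance := by
  intro T entering leaving _
  unfold Spec_max_guests_at_instance max_guests_at_instance max_guests_at_instance_alt
  simp only []
  rw [pv_fold_max, PySem.List.max?_id_cons, Option.getD_some]
  set timeline := PySem.List.sorted (PySem.Set.ofList (entering ++ leaving)) (fun x => x) false with htl
  have hmem : ∀ x : Int, x ∈ timeline ↔ x ∈ entering ++ leaving := by
    intro x
    rw [htl, PySem.List.mem_sorted]
    exact PySem.Set.mem_ofList (xs := entering ++ leaving) (y := x)
  have hsorted : timeline.Pairwise (· < ·) := PySem.List.sorted_ofList_pairwise_lt (entering ++ leaving)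
  have hsweep : pvSweep entering leaving 0 timeline = timeline.map (pvOcc entering leaving) := by
    apply pv_sweep_eq
    · exact hsorted
    · intro x hx hxt
      refine absurd ((hmem x).mpr ?_) hxt
      rcases hx with h | h
      · exact List.mem_append.mpr (Or.inl h)
      · exact List.mem_append.mpr (Or.inr h)
    · have h1 : ∀ (xs : List Int), (∀ x ∈ xs, x ∈ entering ++ leaving) →
          xs.countP (fun x => decide (x ∉ timeline)) = 0 := by
        intro xs hxs
        rw [List.countP_eq_zero]
        intro x hx
        simp [(hmem x).mpr (hxs x hx)]
      rw [h1 entering (fun x hx => List.mem_append.mpr (Or.inl hx)),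
          h1 leaving (fun x hx => List.mem_append.mpr (Or.inr hx))]
      simp
  rw [hsweep]
  have hf : (fun t => (entering.map (fun e => if e ≤ t then (1 : Int) else 0)).sum
      - (leaving.map (fun l => if l ≤ t then (1 : Int) else 0)).sum) = pvOcc entering leaving := by
    funext t
    rw [pv_sum_indicator, pv_sum_indicator, pvOcc]
  rw [hf]
  exact pv_foldl_max_mem_eq (pvOcc entering leaving) timeline (entering ++ leaving) hmem
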